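-- pv_equiv track=rewrite | github.com/huboa/xuexi | oldboy-python18/day03-函数-file/homework_stu/homework-葛卢青/sql.py | three_parse
-- ===== SOURCE A (Python) =====
-- def three_parse(str):
--     key=['>','<','=']
--     res=[]
--     char=''
--     for i in str:
--         if i not in key:
--             char += i
--         if i in key:
--             res.append(char)
--             res.append(i)
--             char=''
--
--     res.append(char)
--     if len(res) == 1:
--         res=res[0].split('like')
--         res.insert(1,'like')
--
--     return res
-- ===== SOURCE B (Python) =====
-- def three_parse(str):
--     # build the token list back-to-front: walk the string right-to-left,
--     # prepending operator tokens and extending the current leading token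
--     res = ['']
--     for c in reversed(str):
--         if c in '><=':
--             res = ['', c] + res
--         else:
--             res = [c + res[0]] + res[1:]
--     if len(res) == 1:
--         res = res[0].split('like')
--         res.insert(1, 'like')
--     return res
-- ===== Notes on version B (the rewrite author's own statement) =====
-- stated objective: alternative
-- what changed: Replaces the left-to-right scan with a mutable accumulator string by a right-to-left pass that builds the token list back-to-front, prepending operator tokens and extending the leading token (rebuilding the list each step, so quadratic in the worst case).
import Mathlib
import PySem

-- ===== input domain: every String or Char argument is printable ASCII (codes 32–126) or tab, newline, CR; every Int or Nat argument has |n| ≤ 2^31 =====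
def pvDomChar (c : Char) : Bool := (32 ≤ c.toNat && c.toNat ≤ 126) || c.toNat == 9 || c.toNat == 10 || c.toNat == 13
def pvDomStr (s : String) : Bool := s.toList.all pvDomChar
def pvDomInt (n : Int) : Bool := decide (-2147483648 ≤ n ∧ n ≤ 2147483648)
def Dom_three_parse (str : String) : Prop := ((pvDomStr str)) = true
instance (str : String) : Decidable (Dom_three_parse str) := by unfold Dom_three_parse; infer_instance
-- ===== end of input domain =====

-- B builds the token list back-to-front with a right-to-left pass (alternative decomposition; same cost).
-- Tokens are carried as List Char in both ports and wrapped with String.ofList at the end (value-identical to Python's strings).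

-- ===== PORT A =====
-- left-to-right scan with an accumulator string `char`, appending to `res` at each operator
def three_parse (str : String) : List String :=
  let key : List Char := ['>', '<', '=']
  let st := str.toList.foldl (fun (st : List (List Char) × List Char) i =>
      let st := if i ∉ key then (st.1, st.2 ++ [i]) else st
      if i ∈ key then (st.1 ++ [st.2, [i]], ([] : List Char)) else st)
    ([], [])
  let res := st.1 ++ [st.2]
  if res.length == 1 then
    let res2 := PySem.Chars.splitOn (PySem.List.pyGetD res 0 []) "like".toList
    (PySem.List.insert res2 1 "like".toList).map String.ofList
  else
    res.map String.ofList

-- ===== PORT B =====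
-- right-to-left pass building the token list back-to-front
def three_parse_alt (str : String) : List String :=
  let res := str.toList.reverse.foldl (fun (res : List (List Char)) c =>
      if c ∈ ['>', '<', '='] then [] :: [c] :: res
      else (c :: res.headD []) :: res.tail)
    [[]]
  if res.length == 1 then
    let res2 := PySem.Chars.splitOn (PySem.List.pyGetD res 0 []) "like".toList
    (PySem.List.insert res2 1 "like".toList).map String.ofList
  else
    res.map String.ofList

-- ===== PRECONDITION & SPEC =====
def Spec_three_parse (str : String) (out : List String) : Prop := out = three_parse_alt str
instance (str : String) (out : List String) : Decidable (Spec_three_parse str out) := by unfold Spec_three_parse; infer_instance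

-- ===== CLAIM (what is proved, stated in full; the proofs are below) =====
def Claim_equal_three_parse : Prop := ∀ (str : String), Dom_three_parse str → Spec_three_parse str (three_parse str)

-- ===== LEMMAS AND PROOFS =====

-- B's step as a foldr step
def pvStepB (c : Char) (res : List (List Char)) : List (List Char) :=
  if c ∈ ['>', '<', '='] then [] :: [c] :: res
  else (c :: res.headD []) :: res.tail

-- prepend `char` onto the head token (a lone `[char]` if the list is empty)
def pvConsHead (char : List Char) : List (List Char) → List (List Char)
  | [] => [char]
  | h :: t => (char ++ h) :: t

theorem pvFoldrB_ne_nil (cs : List Char) : cs.foldr pvStepB [[]] ≠ [] := by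
  cases cs with
  | nil => simp
  | cons c cs =>
    simp only [List.foldr, pvStepB]
    split <;> simp

theorem pvFold_eq (cs : List Char) (res : List (List Char)) (char : List Char) :
    (let st := cs.foldl (fun (st : List (List Char) × List Char) i =>
        let st := if i ∉ ['>', '<', '='] then (st.1, st.2 ++ [i]) else st
        if i ∈ ['>', '<', '='] then (st.1 ++ [st.2, [i]], ([] : List Char)) else st)
      (res, char);
     st.1 ++ [st.2]) = res ++ pvConsHead char (cs.foldr pvStepB [[]]) := by
  induction cs generalizing res char with
  | nil => simp [pvConsHead]
  | cons c cs ih =>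
    simp only [List.foldl, List.foldr]
    by_cases h : c ∈ ['>', '<', '=']
    · rw [if_neg (not_not_intro h), if_pos h, ih]
      cases hfo : cs.foldr pvStepB [[]] with
      | nil => exact absurd hfo (pvFoldrB_ne_nil cs)
      | cons h' t' => simp [pvStepB, h, pvConsHead]
    · rw [if_pos h, if_neg h, ih]
      cases hfo : cs.foldr pvStepB [[]] with
      | nil => exact absurd hfo (pvFoldrB_ne_nil cs)
      | cons h' t' => simp [pvStepB, h, pvConsHead]

theorem pvRes_eq (cs : List Char) :
    (let st := cs.foldl (fun (st : List (List Char) × List Char) i =>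
        let st := if i ∉ ['>', '<', '='] then (st.1, st.2 ++ [i]) else st
        if i ∈ ['>', '<', '='] then (st.1 ++ [st.2, [i]], ([] : List Char)) else st)
      (([] : List (List Char)), ([] : List Char));
     st.1 ++ [st.2]) = cs.foldr pvStepB [[]] := by
  rw [pvFold_eq]
  cases hfo : cs.foldr pvStepB [[]] with
  | nil => exact absurd hfo (pvFoldrB_ne_nil cs)
  | cons h t => simp [pvConsHead]

-- ===== VERDICT (by name: the statement is the Claim_ definition above) =====
theorem three_parse_spec : Claim_equal_three_parse := by
  intro str _
  show three_parse str = three_parse_alt str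
  unfold three_parse three_parse_alt
  rw [List.foldl_reverse]
  have h := pvRes_eq str.toList
  simp only at h ⊢
  rw [h]
  rfl
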